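-- pv_equiv track=rewrite | github.com/Muffinous/DAA | A_PRÁCTICAS/nonograms.py | checkColumnFeasible
-- ===== SOURCE A (Python) =====
-- def checkColumnFeasible(sol, r, c):
--     count = 0
--     start = 0
--     end = r - 1
--     first_time = 1
--
--     for i in range(r):
--         if first_time and (sol[i][c] == '#'):
--             start = i
--             count = count + 1
--             first_time = 0
--
--         elif sol[i][c] == '#':
--             count = count + 1
--
--     if (end - start + 1) == count or count == 0 or start == r - 1:
--         return True
--     else:
--         return False
-- ===== SOURCE B (Python) =====
-- def checkColumnFeasible(sol, r, c):
--     marks = [sol[i][c] == '#' for i in range(r)]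
--     while marks and marks[-1]:
--         marks.pop()
--     return True not in marks
-- ===== Notes on version B (the rewrite author's own statement) =====
-- stated objective: simpler
-- what changed: Replaces the count/first-position/flag state machine and its arithmetic feasibility formula by building the column's fill marks, stripping the trailing filled run, and checking no filled cell remains (suffix-contiguity test).
import Mathlib
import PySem

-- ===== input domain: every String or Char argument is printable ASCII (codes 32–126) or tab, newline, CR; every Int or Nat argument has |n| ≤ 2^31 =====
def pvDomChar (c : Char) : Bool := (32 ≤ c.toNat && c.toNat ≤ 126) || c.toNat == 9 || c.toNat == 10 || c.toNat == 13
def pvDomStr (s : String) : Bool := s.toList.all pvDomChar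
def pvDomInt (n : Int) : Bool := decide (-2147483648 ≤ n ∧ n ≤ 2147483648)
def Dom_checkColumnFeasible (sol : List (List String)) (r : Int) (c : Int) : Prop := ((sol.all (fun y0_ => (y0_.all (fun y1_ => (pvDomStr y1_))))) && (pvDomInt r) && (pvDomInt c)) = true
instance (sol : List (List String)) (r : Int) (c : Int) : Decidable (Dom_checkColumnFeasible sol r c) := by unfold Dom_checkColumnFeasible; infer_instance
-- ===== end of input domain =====

-- B replaces A's count/first-'#'-position/flag state machine and its arithmetic feasibility formula
-- by stripping the column's trailing run of filled marks and checking none remain (suffix-contiguity);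
-- simpler decomposition, same cost.


-- cell access sol[i][c] (shared by both ports; the defaults are unreachable under Pre_)
def pvCell (sol : List (List String)) (c : Int) (i : Int) : String :=
  (PySem.List.pyGet? ((PySem.List.pyGet? sol i).getD []) c).getD ""

-- ===== PORT A =====
-- loop body of A on the state (count, start, first_time)
def pvStepA (χ : Int → Bool) (s : Int × Int × Int) (i : Int) : Int × Int × Int :=
  if (s.2.2 != 0) && χ i then (s.1 + 1, i, 0)
  else if χ i then (s.1 + 1, s.2.1, s.2.2)
  else s

def checkColumnFeasible (sol : List (List String)) (r : Int) (c : Int) : Bool :=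
  let endv := r - 1
  let st := (PySem.List.pyRange 0 r 1).foldl (pvStepA (fun i => pvCell sol c i == "#")) (0, 0, 1)
  if (endv - st.2.1 + 1 == st.1) || (st.1 == 0) || (st.2.1 == r - 1) then true else false

-- ===== PORT B =====
-- Source B's 'while marks and marks[-1]: marks.pop()'
def pvStrip (xs : List Bool) : List Bool :=
  if h : (PySem.List.pyGet? xs (-1)).getD false = true then pvStrip xs.dropLast else xs
termination_by xs.length
decreasing_by
  cases xs with
  | nil => simp [PySem.List.pyGet?, PySem.List.pyIdx?] at h
  | cons a l => simp [List.length_dropLast]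

def checkColumnFeasible_alt (sol : List (List String)) (r : Int) (c : Int) : Bool :=
  let marks := (PySem.List.pyRange 0 r 1).map (fun i => pvCell sol c i == "#")
  !((pvStrip marks).contains true)

-- ===== PRECONDITION & SPEC =====
-- A raises IndexError when some row index i with 0 ≤ i < r is outside sol, or column index c is
-- outside one of the first r rows; Pre_ excludes exactly those inputs.
def Pre_checkColumnFeasible (sol : List (List String)) (r : Int) (c : Int) : Prop :=
  r ≤ (sol.length : Int) ∧ ∀ row ∈ sol.take r.toNat, PySem.Raise.InRange row.length c
instance (sol : List (List String)) (r : Int) (c : Int) : Decidable (Pre_checkColumnFeasible sol r c) := by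
  unfold Pre_checkColumnFeasible; infer_instance

def pvWitness_checkColumnFeasible : List (List String) × Int × Int := ([["#"], ["."]], 2, 0)

def Spec_checkColumnFeasible (sol : List (List String)) (r : Int) (c : Int) (out : Bool) : Prop := out = checkColumnFeasible_alt sol r c
instance (sol : List (List String)) (r : Int) (c : Int) (out : Bool) : Decidable (Spec_checkColumnFeasible sol r c out) := by unfold Spec_checkColumnFeasible; infer_instance

-- ===== CLAIM (what is proved, stated in full; the proofs are below) =====
def Claim_equal_checkColumnFeasible : Prop := ∀ (sol : List (List String)) (r : Int) (c : Int), Dom_checkColumnFeasible sol r c → Pre_checkColumnFeasible sol r c → Spec_checkColumnFeasible sol r c (checkColumnFeasible sol r c)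

-- ===== LEMMAS AND PROOFS =====

theorem pvStrip_nil : pvStrip [] = [] := by
  unfold pvStrip; simp [PySem.List.pyGet?, PySem.List.pyIdx?]

theorem pvStrip_concat_true (ms : List Bool) : pvStrip (ms ++ [true]) = pvStrip ms := by
  rw [pvStrip]; simp [PySem.List.pyGet?_neg_one_append_singleton]

theorem pvStrip_concat_false (ms : List Bool) : pvStrip (ms ++ [false]) = ms ++ [false] := by
  rw [pvStrip]; simp [PySem.List.pyGet?_neg_one_append_singleton]

-- the '#' cells of a column all lie at indices ≥ the first one
theorem pv_findIdx_add_count_le (ms : List Bool) (h : ms.any id = true) :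
    ms.findIdx id + ms.count true ≤ ms.length := by
  induction ms with
  | nil => simp at h
  | cons b l ih =>
    cases b with
    | true => simp [List.findIdx_cons]; exact List.count_le_length
    | false =>
      simp [List.findIdx_cons]
      simp at h
      have := ih (by simpa using h)
      omega

-- A's arithmetic feasibility test on (count, start) equals B's strip-the-trailing-run test
theorem pv_main (ms : List Bool) :
    ((((ms.length : Int) - 1) - (if ms.any id then (ms.findIdx id : Int) else 0) + 1 ==
        (ms.count true : Int)) ||
      ((ms.count true : Int) == 0) ||
      ((if ms.any id then (ms.findIdx id : Int) else 0) == (ms.length : Int) - 1)) =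
    !((pvStrip ms).contains true) := by
  induction ms using List.reverseRecOn with
  | nil => simp [pvStrip_nil]
  | append_singleton ms b ih =>
    by_cases ha : ms.any id = true
    · have hmem : true ∈ ms := by simpa [List.any_eq_true, id] using ha
      have hk : 0 < ms.count true := List.count_pos_iff.mpr hmem
      have hf : ms.findIdx id < ms.length := List.findIdx_lt_length.mpr ⟨true, hmem, rfl⟩
      have hfk := pv_findIdx_add_count_le ms ha
      cases b with
      | true =>
        rw [pvStrip_concat_true, ← ih]
        have h1 : (ms ++ [true]).any id = true := by simp [ha]
        have h2 : (ms ++ [true]).findIdx id = ms.findIdx id := by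
          rw [List.findIdx_append]; simp [hf]
        have h3 : (ms ++ [true]).count true = ms.count true + 1 := by simp
        simp only [h1, ha, if_pos, h2, h3, List.length_append, List.length_cons, List.length_nil]
        rw [Bool.eq_iff_iff]
        simp only [Bool.or_eq_true, beq_iff_eq]
        push_cast
        omega
      | false =>
        rw [pvStrip_concat_false]
        have h1 : (ms ++ [false]).any id = true := by simp [ha]
        have h2 : (ms ++ [false]).findIdx id = ms.findIdx id := by
          rw [List.findIdx_append]; simp [hf]
        have h3 : (ms ++ [false]).count true = ms.count true := by simp
        have h4 : (ms ++ [false]).contains true = true := by simp [List.contains_eq_mem, hmem]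
        rw [h4]
        simp only [h1, if_pos, h2, h3, List.length_append, List.length_cons, List.length_nil]
        simp only [Bool.or_eq_false_iff, beq_eq_false_iff_ne, Bool.not_true]
        refine ⟨⟨by push_cast; omega, by omega⟩, by push_cast; omega⟩
    · have hmem : true ∉ ms := fun h => ha (List.any_eq_true.mpr ⟨true, h, rfl⟩)
      have hk : ms.count true = 0 := by simpa using List.count_eq_zero.mpr hmem
      cases b with
      | true =>
        rw [pvStrip_concat_true, ← ih]
        have h1 : (ms ++ [true]).any id = true := by simp
        have hfe : ms.findIdx id = ms.length := List.findIdx_eq_length.mpr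
          (fun x hx => by cases x with | false => rfl | true => exact absurd hx hmem)
        have h2 : (ms ++ [true]).findIdx id = ms.length := by
          rw [List.findIdx_append]; simp [hfe, List.findIdx_cons]
        have h3 : (ms ++ [true]).count true = 1 := by simp [hk]
        simp only [h1, ha, if_pos, h2, h3, List.length_append, List.length_cons,
          List.length_nil, hk, Bool.false_eq_true]
        simp
      | false =>
        rw [pvStrip_concat_false]
        have h4 : (ms ++ [false]).contains true = false := by simp [List.contains_eq_mem, hmem]
        have h3 : (ms ++ [false]).count true = 0 := by simp [hk]
        rw [h4, h3]
        simp

-- once first_time is 0, A's loop only counts; start and the flag are frozen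
theorem pv_foldA_off (χ : Int → Bool) (l : List Int) (cnt st : Int) :
    l.foldl (pvStepA χ) (cnt, st, 0) = (cnt + ((l.map χ).count true : Int), st, 0) := by
  induction l generalizing cnt with
  | nil => simp
  | cons a l ih =>
    by_cases hχ : χ a = true
    · simp [pvStepA, hχ, List.foldl_cons, ih]
      push_cast; ring
    · simp [pvStepA, hχ, List.foldl_cons, ih]

-- A's loop over range(a, a+n) computes the '#' count and the index of the first '#'
theorem pv_foldA_char (χ : Int → Bool) (n : Nat) :
    ∀ a : Int, (PySem.List.pyRange a (a + n) 1).foldl (pvStepA χ) (0, 0, 1) =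
      (let ms := (PySem.List.pyRange a (a + n) 1).map χ;
       if ms.any id then ((ms.count true : Int), a + (ms.findIdx id : Int), 0) else (0, 0, 1)) := by
  induction n with
  | zero => intro a; simp [PySem.List.pyRange_one_eq_nil]
  | succ n ih =>
    intro a
    rw [show ((n+1:Nat):Int) = (n:Int)+1 from by push_cast; ring]
    have hcons : PySem.List.pyRange a (a + (n+1)) 1 = a :: PySem.List.pyRange (a+1) (a + (n+1)) 1 :=
      PySem.List.pyRange_one_cons (by omega)
    have hshift : (a : Int) + (n+1) = (a+1) + n := by push_cast; ring
    by_cases hχ : χ a = true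
    · rw [hcons]
      simp only [List.foldl_cons, List.map_cons]
      have hstep : pvStepA χ (0, 0, 1) a = (1, a, 0) := by simp [pvStepA, hχ]
      rw [hstep, pv_foldA_off]
      simp [hχ, List.findIdx_cons]
      push_cast; ring
    · rw [hcons]
      simp only [List.foldl_cons, List.map_cons]
      have hstep : pvStepA χ (0, 0, 1) a = (0, 0, 1) := by simp [pvStepA, hχ]
      rw [hstep, hshift, ih (a+1)]
      simp only [List.any_cons, List.findIdx_cons, hχ, List.count_cons]
      by_cases hany : ((PySem.List.pyRange (a+1) ((a+1) + n) 1).map χ).any id = true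
      · simp [hany, hχ, Bool.false_eq_true]
        ring
      · simp [hany, hχ, Bool.false_eq_true]

-- the two ports agree on every input (even outside Pre_, both reading defaults the same way)
theorem pv_ab (sol : List (List String)) (r : Int) (c : Int) :
    checkColumnFeasible sol r c = checkColumnFeasible_alt sol r c := by
  by_cases hr : r ≤ 0
  · simp [checkColumnFeasible, checkColumnFeasible_alt, PySem.List.pyRange_one_eq_nil hr, pvStrip_nil]
  · replace hr : 0 < r := by omega
    have hz : (0 : Int) + (r.toNat : Int) = r := by omega
    have hchar := pv_foldA_char (fun i => pvCell sol c i == "#") r.toNat 0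
    rw [hz] at hchar
    have hlen : (((PySem.List.pyRange 0 r 1).map (fun i => pvCell sol c i == "#")).length : Int) = r := by
      simp [PySem.List.length_pyRange_one]; omega
    have hmain := pv_main ((PySem.List.pyRange 0 r 1).map (fun i => pvCell sol c i == "#"))
    rw [hlen] at hmain
    by_cases hany : ((PySem.List.pyRange 0 r 1).map (fun i => pvCell sol c i == "#")).any id = true
    · have hst : (PySem.List.pyRange 0 r 1).foldl (pvStepA (fun i => pvCell sol c i == "#")) (0, 0, 1)
          = ((((PySem.List.pyRange 0 r 1).map (fun i => pvCell sol c i == "#")).count true : Int),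
             (((PySem.List.pyRange 0 r 1).map (fun i => pvCell sol c i == "#")).findIdx id : Int), 0) := by
        rw [hchar]; simp [hany]
      rw [if_pos hany] at hmain
      simp only [checkColumnFeasible, checkColumnFeasible_alt, hst, ← hmain]
      simp
      rw [Bool.eq_iff_iff]
      simp [List.findIdx_map]
    · have hst : (PySem.List.pyRange 0 r 1).foldl (pvStepA (fun i => pvCell sol c i == "#")) (0, 0, 1)
          = ((0 : Int), (0 : Int), (1 : Int)) := by
        rw [hchar]; simp [hany]
      rw [if_neg hany] at hmain
      simp only [checkColumnFeasible, checkColumnFeasible_alt, hst, ← hmain]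
      simp
      have hc : List.count true ((PySem.List.pyRange 0 r 1).map (fun i => pvCell sol c i == "#")) = 0 := by
        rw [List.count_eq_zero]
        intro hmem
        exact hany (List.any_eq_true.mpr ⟨true, hmem, rfl⟩)
      exact Or.inl (Or.inr hc)

-- ===== VERDICT (by name: the statement is the Claim_ definition above) =====
theorem checkColumnFeasible_spec : Claim_equal_checkColumnFeasible := by
  intro sol r c _ _
  unfold Spec_checkColumnFeasible
  exact pv_ab sol r c
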